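-- pv_equiv track=rewrite | github.com/skyoxu/lastking | scripts/sc/_risk_profile_floor.py | _risk_hits
-- ===== SOURCE A (Python) =====
-- from typing import Any
--
-- SEMANTIC_PREFIXES = (
--     ".taskmaster/",
--     "examples/taskmaster/",
--     "docs/architecture/",
--     "docs/adr/",
--     "docs/prd/",
--     "execution-plans/",
--     "decision-logs/",
-- )
--
-- HIGH_RISK_CODE_PREFIXES = (
--     "game.core/",
--     "game.godot/",
--     "game.core.tests/",
--     "tests.godot/",
-- )
--
-- HIGH_RISK_TOOLING_PREFIXES = (
--     "scripts/sc/",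
--     "scripts/python/",
--     ".github/",
-- )
--
-- HIGH_RISK_EXACT = {
--     "project.godot",
--     "workflow.md",
--     "workflow.example.md",
-- }
--
-- CONTRACT_PREFIX = "game.core/contracts/"
--
-- def _normalize_paths(values: list[str] | tuple[str, ...] | None) -> list[str]:
--     seen: set[str] = set()
--     out: list[str] = []
--     for item in values or []:
--         normalized = str(item or "").strip().replace("\\", "/").lower()
--         if normalized and normalized not in seen:
--             seen.add(normalized)
--             out.append(normalized)
--     return out
--
-- def _risk_hits(change_scope: dict[str, Any] | None) -> dict[str, list[str]]:
--     scope = change_scope if isinstance(change_scope, dict) else {}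
--     changed_paths = _normalize_paths(list(scope.get("changed_paths") or []))
--     unsafe_paths = _normalize_paths(list(scope.get("unsafe_paths") or []))
--     semantic_hits = [path for path in changed_paths if any(path.startswith(prefix) for prefix in SEMANTIC_PREFIXES)]
--     code_hits = [
--         path
--         for path in changed_paths
--         if any(path.startswith(prefix) for prefix in HIGH_RISK_CODE_PREFIXES) or path == "project.godot"
--     ]
--     tooling_hits = [
--         path
--         for path in changed_paths
--         if any(path.startswith(prefix) for prefix in HIGH_RISK_TOOLING_PREFIXES) or path in HIGH_RISK_EXACT
--     ]
--     contract_hits = [path for path in changed_paths if path.startswith(CONTRACT_PREFIX)]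
--     return {
--         "changed_paths": changed_paths,
--         "unsafe_paths": unsafe_paths,
--         "semantic_hits": semantic_hits,
--         "code_hits": code_hits,
--         "tooling_hits": tooling_hits,
--         "contract_hits": contract_hits,
--     }
-- ===== SOURCE B (Python) =====
-- # B indexes slash-terminated prefixes of each path in hash maps instead of scanning prefix tuples with startswith.
--
-- PREFIX_FLAGS = {
--     ".taskmaster/": (True, False, False, False),
--     "examples/taskmaster/": (True, False, False, False),
--     "docs/architecture/": (True, False, False, False),
--     "docs/adr/": (True, False, False, False),
--     "docs/prd/": (True, False, False, False),
--     "execution-plans/": (True, False, False, False),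
--     "decision-logs/": (True, False, False, False),
--     "game.core/": (False, True, False, False),
--     "game.godot/": (False, True, False, False),
--     "game.core.tests/": (False, True, False, False),
--     "tests.godot/": (False, True, False, False),
--     "scripts/sc/": (False, False, True, False),
--     "scripts/python/": (False, False, True, False),
--     ".github/": (False, False, True, False),
--     "game.core/contracts/": (False, False, False, True),
-- }
--
-- EXACT_FLAGS = {
--     "project.godot": (False, True, True, False),
--     "workflow.md": (False, False, True, False),
--     "workflow.example.md": (False, False, True, False),
-- }
--
-- NO_FLAGS = (False, False, False, False)
--
--
-- def _classify(path):
--     sem, code, tool, con = EXACT_FLAGS.get(path, NO_FLAGS)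
--     for i, ch in enumerate(path):
--         if ch == "/":
--             s2, c2, t2, k2 = PREFIX_FLAGS.get(path[: i + 1], NO_FLAGS)
--             sem, code, tool, con = sem or s2, code or c2, tool or t2, con or k2
--     return (sem, code, tool, con)
--
--
-- def _normalize_paths(values):
--     cleaned = (str(item or "").strip().replace("\\", "/").lower() for item in (values or []))
--     return list(dict.fromkeys(path for path in cleaned if path))
--
--
-- def _risk_hits(change_scope):
--     scope = change_scope if isinstance(change_scope, dict) else {}
--     changed_paths = _normalize_paths(list(scope.get("changed_paths") or []))
--     unsafe_paths = _normalize_paths(list(scope.get("unsafe_paths") or []))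
--     tagged = [(path, _classify(path)) for path in changed_paths]
--     return {
--         "changed_paths": changed_paths,
--         "unsafe_paths": unsafe_paths,
--         "semantic_hits": [path for path, flags in tagged if flags[0]],
--         "code_hits": [path for path, flags in tagged if flags[1]],
--         "tooling_hits": [path for path, flags in tagged if flags[2]],
--         "contract_hits": [path for path, flags in tagged if flags[3]],
--     }
-- ===== Notes on version B (the rewrite author's own statement) =====
-- stated objective: alternative
-- what changed: B replaces A's startswith scans over the prefix tuples by hash-map lookups: each path is classified in one character walk that looks up its slash-terminated prefixes (and the whole path for exact matches) in two dicts mapping prefix/name to category flags, so the per-category prefix scans and A's four separate passes over changed_paths disappear; normalization uses map/filter/dict.fromkeys instead of A's seen-set loop.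
import Mathlib
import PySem

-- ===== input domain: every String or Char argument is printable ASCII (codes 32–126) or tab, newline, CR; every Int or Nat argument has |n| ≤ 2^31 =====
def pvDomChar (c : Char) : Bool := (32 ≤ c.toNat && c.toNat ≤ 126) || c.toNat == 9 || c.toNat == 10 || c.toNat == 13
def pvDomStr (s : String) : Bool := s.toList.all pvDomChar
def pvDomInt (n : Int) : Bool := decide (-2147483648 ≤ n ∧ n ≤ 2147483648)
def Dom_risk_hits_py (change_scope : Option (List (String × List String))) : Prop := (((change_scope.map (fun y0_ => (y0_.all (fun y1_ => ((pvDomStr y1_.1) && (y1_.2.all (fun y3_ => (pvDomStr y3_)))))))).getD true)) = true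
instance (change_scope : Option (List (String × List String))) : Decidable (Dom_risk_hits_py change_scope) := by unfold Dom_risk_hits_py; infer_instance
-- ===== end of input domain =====

-- B classifies each path by hash-indexing its slash-terminated prefixes in two dicts instead of
-- scanning the prefix tuples with startswith (objective: alternative; A's four scans also fuse away).

-- module-level constants of Source A
def pvSEMANTIC_PREFIXES : List String :=
  [".taskmaster/", "examples/taskmaster/", "docs/architecture/", "docs/adr/",
   "docs/prd/", "execution-plans/", "decision-logs/"]
def pvHIGH_RISK_CODE_PREFIXES : List String :=
  ["game.core/", "game.godot/", "game.core.tests/", "tests.godot/"]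
def pvHIGH_RISK_TOOLING_PREFIXES : List String :=
  ["scripts/sc/", "scripts/python/", ".github/"]
def pvHIGH_RISK_EXACT : PySem.Set String :=
  PySem.Set.ofList ["project.godot", "workflow.md", "workflow.example.md"]
def pvCONTRACT_PREFIX : String := "game.core/contracts/"

-- str(item or "").strip().replace("\\", "/").lower()  (same expression in both sources)
def pvNormItem (item : String) : String :=
  PySem.Str.lower (PySem.Str.replace (PySem.Str.strip (if item == "" then "" else item)) "\\" "/")

-- ===== PORT A =====
-- A's _normalize_paths: one loop carrying a seen-set and the output list
def pvNormalizePathsA (values : List String) : List String :=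
  (values.foldl
    (fun (st : PySem.Set String × List String) item =>
      let normalized := pvNormItem item
      if normalized != "" && !(PySem.Set.contains st.1 normalized) then
        (PySem.Set.add st.1 normalized, st.2 ++ [normalized])
      else st)
    ((PySem.Set.empty : PySem.Set String), ([] : List String))).2

def risk_hits_py (change_scope : Option (List (String × List String))) : List (String × List String) :=
  let scope := change_scope.getD []
  let changed_paths := pvNormalizePathsA ((PySem.Dict.get? (PySem.Dict.mk scope) "changed_paths").getD [])
  let usafe_paths := pvNormalizePathsA ((PySem.Dict.get? (PySem.Dict.mk scope) "unsafe_paths").getD [])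
  let semantic_hits := changed_paths.filter
    (fun path => pvSEMANTIC_PREFIXES.any (fun prefix_ => PySem.Str.startswith path prefix_))
  let code_hits := changed_paths.filter
    (fun path => pvHIGH_RISK_CODE_PREFIXES.any (fun prefix_ => PySem.Str.startswith path prefix_)
      || path == "project.godot")
  let tooling_hits := changed_paths.filter
    (fun path => pvHIGH_RISK_TOOLING_PREFIXES.any (fun prefix_ => PySem.Str.startswith path prefix_)
      || PySem.Set.contains pvHIGH_RISK_EXACT path)
  let contract_hits := changed_paths.filter (fun path => PySem.Str.startswith path pvCONTRACT_PREFIX)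
  [("changed_paths", changed_paths), ("unsafe_paths", usafe_paths),
   ("semantic_hits", semantic_hits), ("code_hits", code_hits),
   ("tooling_hits", tooling_hits), ("contract_hits", contract_hits)]

-- ===== PORT B =====
-- Source B's PREFIX_FLAGS / EXACT_FLAGS / NO_FLAGS (flags = (semantic, code, tooling, contract))
def pvPREFIX_FLAGS : PySem.Dict String (Bool × Bool × Bool × Bool) := PySem.Dict.ofList
  [(".taskmaster/", (true, false, false, false)),
   ("examples/taskmaster/", (true, false, false, false)),
   ("docs/architecture/", (true, false, false, false)),
   ("docs/adr/", (true, false, false, false)),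
   ("docs/prd/", (true, false, false, false)),
   ("execution-plans/", (true, false, false, false)),
   ("decision-logs/", (true, false, false, false)),
   ("game.core/", (false, true, false, false)),
   ("game.godot/", (false, true, false, false)),
   ("game.core.tests/", (false, true, false, false)),
   ("tests.godot/", (false, true, false, false)),
   ("scripts/sc/", (false, false, true, false)),
   ("scripts/python/", (false, false, true, false)),
   (".github/", (false, false, true, false)),
   ("game.core/contracts/", (false, false, false, true))]
def pvEXACT_FLAGS : PySem.Dict String (Bool × Bool × Bool × Bool) := PySem.Dict.ofList
  [("project.godot", (false, true, true, false)),
   ("workflow.md", (false, false, true, false)),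
   ("workflow.example.md", (false, false, true, false))]
def pvNO_FLAGS : Bool × Bool × Bool × Bool := (false, false, false, false)

-- Source B's _classify: one walk over the characters, dict lookups on path[:i+1] at each '/'
def pvClassify (path : String) : Bool × Bool × Bool × Bool :=
  (PySem.List.enumerate path.toList 0).foldl
    (fun fl p =>
      if p.2 == '/' then
        let f2 := PySem.Dict.getD pvPREFIX_FLAGS (PySem.Str.slice path none (some (p.1 + 1))) pvNO_FLAGS
        (fl.1 || f2.1, fl.2.1 || f2.2.1, fl.2.2.1 || f2.2.2.1, fl.2.2.2 || f2.2.2.2)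
      else fl)
    (PySem.Dict.getD pvEXACT_FLAGS path pvNO_FLAGS)

-- Source B's _normalize_paths: map, filter, then list(dict.fromkeys(...)) = PySem.List.dedup
def pvNormalizePathsAlt (values : List String) : List String :=
  PySem.List.dedup ((values.map pvNormItem).filter (fun path => path != ""))

def risk_hits_py_alt (change_scope : Option (List (String × List String))) : List (String × List String) :=
  let scope := change_scope.getD []
  let changed_paths := pvNormalizePathsAlt ((PySem.Dict.get? (PySem.Dict.mk scope) "changed_paths").getD [])
  let usafe_paths := pvNormalizePathsAlt ((PySem.Dict.get? (PySem.Dict.mk scope) "unsafe_paths").getD [])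
  let tagged := changed_paths.map (fun path => (path, pvClassify path))
  [("changed_paths", changed_paths), ("unsafe_paths", usafe_paths),
   ("semantic_hits", (tagged.filter (fun t => t.2.1)).map (fun t => t.1)),
   ("code_hits", (tagged.filter (fun t => t.2.2.1)).map (fun t => t.1)),
   ("tooling_hits", (tagged.filter (fun t => t.2.2.2.1)).map (fun t => t.1)),
   ("contract_hits", (tagged.filter (fun t => t.2.2.2.2)).map (fun t => t.1))]

-- ===== PRECONDITION & SPEC =====
def Spec_risk_hits_py (change_scope : Option (List (String × List String))) (out : List (String × List String)) : Prop := out = risk_hits_py_alt change_scope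
instance (change_scope : Option (List (String × List String))) (out : List (String × List String)) : Decidable (Spec_risk_hits_py change_scope out) := by unfold Spec_risk_hits_py; infer_instance

-- ===== CLAIM (what is proved, stated in full; the proofs are below) =====
def Claim_equal_risk_hits_py : Prop := ∀ (change_scope : Option (List (String × List String))), Dom_risk_hits_py change_scope → Spec_risk_hits_py change_scope (risk_hits_py change_scope)

-- ===== LEMMAS AND PROOFS =====

-- A's loop body, named for the proof (defeq to the lambda in pvNormalizePathsA)
def pvStepA (st : PySem.Set String × List String) (item : String) : PySem.Set String × List String :=
  let normalized := pvNormItem item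
  if normalized != "" && !(PySem.Set.contains st.1 normalized) then
    (PySem.Set.add st.1 normalized, st.2 ++ [normalized])
  else st

-- A's seen-set loop, started with seen = out = s, is Set.add-folding over the nonempty normalized items
theorem pvNormLoop_eq (values : List String) (s : List String) :
    (values.foldl pvStepA ((s : PySem.Set String), s)).2
    = ((values.map pvNormItem).filter (fun path => path != "")).foldl PySem.Set.add s := by
  induction values generalizing s with
  | nil => rfl
  | cons item rest ih =>
    rw [List.foldl_cons, List.map_cons, List.filter_cons]
    by_cases h0 : pvNormItem item = ""
    · rw [show pvStepA ((s : PySem.Set String), s) item = (s, s) from by simp [pvStepA, h0],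
        if_neg (by simp [h0])]
      exact ih s
    · by_cases hc : PySem.Set.contains s (pvNormItem item) = true
      · rw [show pvStepA ((s : PySem.Set String), s) item = (s, s) from by
            simp [pvStepA, PySem.Set.contains] at hc ⊢; simp [hc],
          if_pos (by simp [h0]), List.foldl_cons,
          show PySem.Set.add s (pvNormItem item) = s from by
            simp [PySem.Set.add, PySem.Set.contains] at hc ⊢; simp [hc]]
        exact ih s
      · rw [show pvStepA ((s : PySem.Set String), s) item = (s ++ [pvNormItem item], s ++ [pvNormItem item]) from by
            simp [pvStepA, PySem.Set.contains] at hc ⊢; simp [PySem.Set.add, h0, hc],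
          if_pos (by simp [h0]), List.foldl_cons,
          show PySem.Set.add s (pvNormItem item) = s ++ [pvNormItem item] from by
            simp [PySem.Set.contains] at hc; simp [PySem.Set.add, hc]]
        exact ih (s ++ [pvNormItem item])

theorem pvNormalize_eq (values : List String) :
    pvNormalizePathsA values = pvNormalizePathsAlt values := by
  unfold pvNormalizePathsA pvNormalizePathsAlt
  rw [PySem.List.dedup_eq_ofList, PySem.Set.ofList_eq_foldl]
  exact pvNormLoop_eq values []

-- first-match association lookup peels one literal entry at a time
theorem pvLookup_cons {α : Type} (k : String) (v : α) (rest : List (String × α)) (s : String) (d0 : α) :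
    (Option.map (fun x => x.2) (List.find? (fun p => p.1 == s) ((k, v) :: rest))).getD d0
    = if s = k then v
      else (Option.map (fun x => x.2) (List.find? (fun p => p.1 == s) rest)).getD d0 := by
  by_cases h : s = k
  · subst h; simp [List.find?]
  · simp [List.find?, beq_false_of_ne (Ne.symm h), h]

-- what PREFIX_FLAGS.get(s, NO_FLAGS) says, component by component
theorem pvPrefixFlags_eq (s : String) :
    PySem.Dict.getD pvPREFIX_FLAGS s pvNO_FLAGS
    = (decide (s ∈ pvSEMANTIC_PREFIXES), decide (s ∈ pvHIGH_RISK_CODE_PREFIXES),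
       decide (s ∈ pvHIGH_RISK_TOOLING_PREFIXES), decide (s = pvCONTRACT_PREFIX)) := by
  by_cases h1 : s = ".taskmaster/"
  · subst h1; rfl
  by_cases h2 : s = "examples/taskmaster/"
  · subst h2; rfl
  by_cases h3 : s = "docs/architecture/"
  · subst h3; rfl
  by_cases h4 : s = "docs/adr/"
  · subst h4; rfl
  by_cases h5 : s = "docs/prd/"
  · subst h5; rfl
  by_cases h6 : s = "execution-plans/"
  · subst h6; rfl
  by_cases h7 : s = "decision-logs/"
  · subst h7; rfl
  by_cases h8 : s = "game.core/"
  · subst h8; rfl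
  by_cases h9 : s = "game.godot/"
  · subst h9; rfl
  by_cases h10 : s = "game.core.tests/"
  · subst h10; rfl
  by_cases h11 : s = "tests.godot/"
  · subst h11; rfl
  by_cases h12 : s = "scripts/sc/"
  · subst h12; rfl
  by_cases h13 : s = "scripts/python/"
  · subst h13; rfl
  by_cases h14 : s = ".github/"
  · subst h14; rfl
  by_cases h15 : s = "game.core/contracts/"
  · subst h15; rfl
  show (Option.map (fun x => x.2) (List.find? (fun p => p.1 == s)
      [(".taskmaster/", (true, false, false, false)),
       ("examples/taskmaster/", (true, false, false, false)),
       ("docs/architecture/", (true, false, false, false)),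
       ("docs/adr/", (true, false, false, false)),
       ("docs/prd/", (true, false, false, false)),
       ("execution-plans/", (true, false, false, false)),
       ("decision-logs/", (true, false, false, false)),
       ("game.core/", (false, true, false, false)),
       ("game.godot/", (false, true, false, false)),
       ("game.core.tests/", (false, true, false, false)),
       ("tests.godot/", (false, true, false, false)),
       ("scripts/sc/", (false, false, true, false)),
       ("scripts/python/", (false, false, true, false)),
       (".github/", (false, false, true, false)),
       ("game.core/contracts/", (false, false, false, true))])).getD pvNO_FLAGS = _
  simp only [pvLookup_cons]
  rw [if_neg h1, if_neg h2, if_neg h3, if_neg h4, if_neg h5, if_neg h6, if_neg h7, if_neg h8, if_neg h9, if_neg h10, if_neg h11, if_neg h12, if_neg h13, if_neg h14, if_neg h15]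
  simp [pvSEMANTIC_PREFIXES, pvHIGH_RISK_CODE_PREFIXES, pvHIGH_RISK_TOOLING_PREFIXES,
    pvCONTRACT_PREFIX, pvNO_FLAGS, h1, h2, h3, h4, h5, h6, h7, h8, h9, h10, h11, h12, h13, h14, h15]

-- what EXACT_FLAGS.get(path, NO_FLAGS) says
theorem pvExactFlags_eq (s : String) :
    PySem.Dict.getD pvEXACT_FLAGS s pvNO_FLAGS
    = (false, s == "project.godot", PySem.Set.contains pvHIGH_RISK_EXACT s, false) := by
  show (Option.map (fun x => x.2) (List.find? (fun p => p.1 == s)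
      [("project.godot", (false, true, true, false)),
       ("workflow.md", (false, false, true, false)),
       ("workflow.example.md", (false, false, true, false))])).getD pvNO_FLAGS = _
  simp only [pvLookup_cons]
  split_ifs <;> simp_all [pvHIGH_RISK_EXACT, pvNO_FLAGS, PySem.Set.ofList, PySem.Set.contains]

-- the four-flag or-fold is four list.any's
theorem pvFoldOr4 (l : List (Int × Char)) (c : Int × Char → Bool)
    (g : Int × Char → Bool × Bool × Bool × Bool) (init : Bool × Bool × Bool × Bool) :
    l.foldl
      (fun fl p => if c p then
          (fl.1 || (g p).1, fl.2.1 || (g p).2.1, fl.2.2.1 || (g p).2.2.1, fl.2.2.2 || (g p).2.2.2)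
        else fl) init
    = (init.1 || l.any (fun p => c p && (g p).1),
       init.2.1 || l.any (fun p => c p && (g p).2.1),
       init.2.2.1 || l.any (fun p => c p && (g p).2.2.1),
       init.2.2.2 || l.any (fun p => c p && (g p).2.2.2)) := by
  induction l generalizing init with
  | nil => simp
  | cons x xs ih =>
    rw [List.foldl_cons, ih]
    by_cases hx : c x = true <;> simp [hx, Bool.or_assoc]

-- the per-position flag lookup of Source B's loop, named so the fold lemma can be instantiated
def pvG (path : String) (p : Int × Char) : Bool × Bool × Bool × Bool :=
  PySem.Dict.getD pvPREFIX_FLAGS (PySem.Str.slice path none (some (p.1 + 1))) pvNO_FLAGS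

-- scanning the '/' positions of path for members of L equals testing L's prefixes with
-- startswith, provided every member of L ends in '/'
theorem pvAnySlash (path : String) (L : List String)
    (hL : ∀ pre ∈ L, pre.toList.getLast? = some '/') :
    ((PySem.List.enumerate path.toList 0).any (fun p =>
        (p.2 == '/') && decide ((PySem.Str.slice path none (some (p.1 + 1))) ∈ L)))
    = L.any (fun pre => PySem.Str.startswith path pre) := by
  rw [Bool.eq_iff_iff]
  simp only [List.any_eq_true]
  constructor
  · rintro ⟨p, hp, hcond⟩
    obtain ⟨k, hk, rfl⟩ := (PySem.List.mem_enumerate_iff _ _ _).mp hp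
    simp only [Bool.and_eq_true, beq_iff_eq, decide_eq_true_eq] at hcond
    obtain ⟨hslash, hmem⟩ := hcond
    refine ⟨_, hmem, ?_⟩
    have hsl : (PySem.Str.slice path none (some ((0 : Int) + ↑k + 1))).toList
        = path.toList.take (k + 1) := by
      rw [show (PySem.Str.slice path none (some ((0 : Int) + ↑k + 1))).toList
          = PySem.List.slice path.toList none (some ((0 : Int) + ↑k + 1)) from by simp,
        PySem.List.slice_to _ (show (0 : Int) ≤ 0 + ↑k + 1 by positivity)]
      congr 1
      omega
    have hpre : (PySem.Str.slice path none (some ((0 : Int) + ↑k + 1))).toList <+: path.toList := by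
      rw [hsl]; exact List.take_prefix _ _
    simp only [PySem.Str.startswith_eq]
    exact (PySem.Chars.startswith_iff _ _).mpr hpre
  · rintro ⟨pre, hpre, hsw⟩
    have hpfx : pre.toList <+: path.toList := by
      rw [PySem.Str.startswith_eq] at hsw
      exact (PySem.Chars.startswith_iff _ _).mp hsw
    have hlast := hL pre hpre
    have hne : pre.toList ≠ [] := by intro h; rw [h] at hlast; simp at hlast
    have hlen0 : 0 < pre.toList.length := List.length_pos_iff.mpr hne
    set n := pre.toList.length with hn
    have htake : pre.toList = path.toList.take n := List.prefix_iff_eq_take.mp hpfx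
    have hnle : n ≤ path.toList.length := hpfx.length_le
    have hk : n - 1 < path.toList.length := by omega
    refine ⟨((0 : Int) + ↑(n - 1), path.toList[n - 1]), (PySem.List.mem_enumerate_iff _ _ _).mpr ⟨n - 1, hk, rfl⟩, ?_⟩
    have hsl : (PySem.Str.slice path none (some ((0 : Int) + ↑(n - 1) + 1))).toList
        = path.toList.take n := by
      rw [show (PySem.Str.slice path none (some ((0 : Int) + ↑(n - 1) + 1))).toList
          = PySem.List.slice path.toList none (some ((0 : Int) + ↑(n - 1) + 1)) from by simp,
        PySem.List.slice_to _ (show (0 : Int) ≤ 0 + ↑(n - 1) + 1 by positivity)]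
      congr 1
      omega
    have hslpre : PySem.Str.slice path none (some ((0 : Int) + ↑(n - 1) + 1)) = pre := by
      apply String.toList_inj.mp; rw [hsl, ← htake]
    have hgl : pre.toList[n - 1]? = some '/' := by
      rw [List.getLast?_eq_getElem?] at hlast; simpa [hn] using hlast
    have hchar : path.toList[n - 1] = '/' := by
      have h1 : (path.toList.take n)[n - 1]? = path.toList[n - 1]? :=
        List.getElem?_take_of_lt (by omega)
      rw [← htake, hgl] at h1
      have := List.getElem?_eq_getElem hk
      rw [this] at h1; exact (Option.some_inj.mp h1.symm)
    have hslpre' : PySem.Str.slice path none (some ((↑(n - 1) : Int) + 1)) = pre := by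
      rw [show ((↑(n - 1) : Int) + 1) = (0 : Int) + ↑(n - 1) + 1 from by ring]; exact hslpre
    simp [hchar, hslpre', hpre]

-- Source B's _classify computes exactly Source A's four membership predicates
theorem pvClassify_spec (path : String) :
    pvClassify path
    = (pvSEMANTIC_PREFIXES.any (fun prefix_ => PySem.Str.startswith path prefix_),
       pvHIGH_RISK_CODE_PREFIXES.any (fun prefix_ => PySem.Str.startswith path prefix_)
         || path == "project.godot",
       pvHIGH_RISK_TOOLING_PREFIXES.any (fun prefix_ => PySem.Str.startswith path prefix_)
         || PySem.Set.contains pvHIGH_RISK_EXACT path,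
       PySem.Str.startswith path pvCONTRACT_PREFIX) := by
  have hred : pvClassify path = (PySem.List.enumerate path.toList 0).foldl
      (fun fl p => if p.2 == '/' then
          (fl.1 || (pvG path p).1, fl.2.1 || (pvG path p).2.1,
           fl.2.2.1 || (pvG path p).2.2.1, fl.2.2.2 || (pvG path p).2.2.2)
        else fl)
      (PySem.Dict.getD pvEXACT_FLAGS path pvNO_FLAGS) := rfl
  have h4 := pvAnySlash path [pvCONTRACT_PREFIX] (by decide)
  simp only [List.mem_singleton, List.any_cons, List.any_nil, Bool.or_false] at h4
  rw [hred, pvFoldOr4 _ (fun p => p.2 == '/') (pvG path) _]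
  simp only [pvG, pvPrefixFlags_eq, pvExactFlags_eq]
  rw [pvAnySlash path pvSEMANTIC_PREFIXES (by decide),
    pvAnySlash path pvHIGH_RISK_CODE_PREFIXES (by decide),
    pvAnySlash path pvHIGH_RISK_TOOLING_PREFIXES (by decide), h4]
  simp [Bool.or_comm]

-- tag-then-filter-then-project is filter on the tag
theorem pvTagged_filter (l : List String) (q : Bool × Bool × Bool × Bool → Bool)
    (f : String → Bool × Bool × Bool × Bool) :
    ((l.map (fun p => (p, f p))).filter (fun t => q t.2)).map (fun t => t.1)
    = l.filter (fun p => q (f p)) := by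
  induction l with
  | nil => rfl
  | cons x xs ih => by_cases h : q (f x) = true <;> simp [h, ih]

-- the four instances of pvTagged_filter at Source B's four projections
theorem pvTagged1 (l : List String) (f : String → Bool × Bool × Bool × Bool) :
    ((l.map (fun p => (p, f p))).filter (fun t => t.2.1)).map (fun t => t.1)
    = l.filter (fun p => (f p).1) := pvTagged_filter l (fun x => x.1) f
theorem pvTagged2 (l : List String) (f : String → Bool × Bool × Bool × Bool) :
    ((l.map (fun p => (p, f p))).filter (fun t => t.2.2.1)).map (fun t => t.1)
    = l.filter (fun p => (f p).2.1) := pvTagged_filter l (fun x => x.2.1) f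
theorem pvTagged3 (l : List String) (f : String → Bool × Bool × Bool × Bool) :
    ((l.map (fun p => (p, f p))).filter (fun t => t.2.2.2.1)).map (fun t => t.1)
    = l.filter (fun p => (f p).2.2.1) := pvTagged_filter l (fun x => x.2.2.1) f
theorem pvTagged4 (l : List String) (f : String → Bool × Bool × Bool × Bool) :
    ((l.map (fun p => (p, f p))).filter (fun t => t.2.2.2.2)).map (fun t => t.1)
    = l.filter (fun p => (f p).2.2.2) := pvTagged_filter l (fun x => x.2.2.2) f

-- ===== VERDICT (by name: the statement is the Claim_ definition above) =====
theorem risk_hits_py_spec : Claim_equal_risk_hits_py := by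
  intro change_scope _
  unfold Spec_risk_hits_py risk_hits_py risk_hits_py_alt
  simp only [pvNormalize_eq, pvTagged1, pvTagged2, pvTagged3, pvTagged4, pvClassify_spec]
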